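-- pv_equiv track=rewrite | github.com/austinbyron/LegalMation-Coding-Challenge | ParseInputs.py | clean_lines
-- ===== SOURCE A (Python) =====
-- def clean_lines(lines):
--
--     # Join together the lines into something cohesive
--     joined = " ".join(lines)
--
--     plaintiff = ""
--     defendant = ""
--
--     got_plaintiff = False
--
--     # Split the joined lines at spaces to search for specific words
--     words = joined.split(' ')
--
--     # Search through all of the words collected and search for 'v.' or 'vs.',
--     # and mark when the versus is found -- everything before is the plaintiff(s)
--     # and everything after is the defendant(s)
--     for word in words:
--         if "v." in word.casefold() or "vs." in word.casefold():
--             got_plaintiff = True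
--         else:
--             if got_plaintiff:
--                 defendant += word + ' '
--             else:
--                 plaintiff += word + ' '
--
--     # Some form of the word "Plaintiff" may have been included at the end of the plaintiff
--     # section, which is redundant, so remove the final word if it is
--     plaintiff_words = plaintiff.split(' ')
--     if 'plaintiff' in plaintiff_words[-1].casefold():
--         plaintiff_words = plaintiff_words[:-1]
--     plaintiff = " ".join(plaintiff_words)
--
--     # Strip any leading and trailing whitespace from the plaintiff and defendant
--     plaintiff = plaintiff.strip()
--     defendant = defendant.strip()
--
--     return plaintiff, defendant
-- ===== SOURCE B (Python) =====
-- def clean_lines(lines):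
--     # Find the first "versus" marker word; everything before it is the
--     # plaintiff, everything after it (minus further marker words) the defendant.
--     words = " ".join(lines).split(' ')
--
--     def marker(w):
--         cf = w.casefold()
--         return "v." in cf or "vs." in cf
--
--     idx = next((i for i, w in enumerate(words) if marker(w)), None)
--     if idx is None:
--         return " ".join(words).strip(), ""
--     plaintiff = " ".join(words[:idx]).strip()
--     defendant = " ".join(w for w in words[idx + 1:] if not marker(w)).strip()
--     return plaintiff, defendant
-- ===== Notes on version B (the rewrite author's own statement) =====
-- stated objective: simpler
-- what changed: Replaces the stateful accumulate-strings-with-flag loop (plus the dead trailing-'plaintiff' removal via split/rejoin) by locating the first marker word's index and joining the word slices before/after it, filtering markers out of the defendant slice.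
import Mathlib
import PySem

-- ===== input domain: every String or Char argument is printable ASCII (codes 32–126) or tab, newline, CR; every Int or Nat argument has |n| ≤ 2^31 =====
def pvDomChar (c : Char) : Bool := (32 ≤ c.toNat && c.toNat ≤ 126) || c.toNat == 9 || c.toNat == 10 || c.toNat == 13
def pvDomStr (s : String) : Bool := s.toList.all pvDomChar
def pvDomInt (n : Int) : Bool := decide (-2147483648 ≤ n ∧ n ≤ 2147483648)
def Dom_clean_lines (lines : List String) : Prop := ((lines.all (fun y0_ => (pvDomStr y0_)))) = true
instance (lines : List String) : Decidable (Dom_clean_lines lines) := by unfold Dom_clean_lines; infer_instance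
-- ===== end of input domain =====

-- B replaces A's stateful accumulate-two-strings-with-flag loop (plus its dead trailing-"plaintiff"
-- removal) by locating the first marker word's index and joining word slices: simpler decomposition.
-- Strings are carried as List Char (PySem's string functions are defined there); casefold = lower, exact on the ASCII domain.

-- ===== PORT A =====
-- the loop body: state = (plaintiff, defendant, got_plaintiff)
def pvStepA (st : List Char × List Char × Bool) (word : List Char) : List Char × List Char × Bool :=
  if PySem.Chars.isIn "v.".toList (PySem.Chars.lower word) ||
     PySem.Chars.isIn "vs.".toList (PySem.Chars.lower word) then
    (st.1, st.2.1, true)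
  else if st.2.2 then
    (st.1, st.2.1 ++ word ++ [' '], st.2.2)
  else
    (st.1 ++ word ++ [' '], st.2.1, st.2.2)

def clean_lines (lines : List String) : String × String :=
  let joined := PySem.Chars.join " ".toList (lines.map String.toList)
  let words := PySem.Chars.splitOn joined " ".toList
  let st := words.foldl pvStepA ([], [], false)
  let plaintiff := st.1
  let defendant := st.2.1
  let plaintiff_words := PySem.Chars.splitOn plaintiff " ".toList
  -- plaintiff_words[-1]: split always returns a non-empty list, so Python's IndexError is unreachable and pyGetD is exact here
  let plaintiff_words' :=
    if PySem.Chars.isIn "plaintiff".toList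
        (PySem.Chars.lower (PySem.List.pyGetD plaintiff_words (-1) [])) then
      PySem.List.slice plaintiff_words none (some (-1))
    else plaintiff_words
  let plaintiff2 := PySem.Chars.join " ".toList plaintiff_words'
  (String.ofList (PySem.Chars.strip plaintiff2), String.ofList (PySem.Chars.strip defendant))

-- ===== PORT B =====
def pvMarker (w : List Char) : Bool :=
  let cf := PySem.Chars.lower w
  PySem.Chars.isIn "v.".toList cf || PySem.Chars.isIn "vs.".toList cf

def clean_lines_alt (lines : List String) : String × String :=
  let words := PySem.Chars.splitOn (PySem.Chars.join " ".toList (lines.map String.toList)) " ".toList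
  match words.findIdx? pvMarker with
  | none => (String.ofList (PySem.Chars.strip (PySem.Chars.join " ".toList words)), String.ofList [])
  | some i =>
      (String.ofList (PySem.Chars.strip (PySem.Chars.join " ".toList (words.take i))),
       String.ofList (PySem.Chars.strip (PySem.Chars.join " ".toList
         ((words.drop (i + 1)).filter (fun w => !pvMarker w)))))

-- ===== PRECONDITION & SPEC =====
def Spec_clean_lines (lines : List String) (out : String × String) : Prop := out = clean_lines_alt lines
instance (lines : List String) (out : String × String) : Decidable (Spec_clean_lines lines out) := by unfold Spec_clean_lines; infer_instance

-- ===== CLAIM (what is proved, stated in full; the proofs are below) =====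
def Claim_equal_clean_lines : Prop := ∀ (lines : List String), Dom_clean_lines lines → Spec_clean_lines lines (clean_lines lines)

-- ===== LEMMAS AND PROOFS =====

-- a clean structural recursion equal to PySem.Chars.splitOn · [' ']
def pvSplitSp : List Char → List (List Char)
  | [] => [[]]
  | c :: rest => if c = ' ' then [] :: pvSplitSp rest else (pvSplitSp rest).modifyHead (c :: ·)

lemma pvSplitSp_ne_nil (s : List Char) : pvSplitSp s ≠ [] := by
  cases s with
  | nil => simp [pvSplitSp]
  | cons c rest =>
    simp only [pvSplitSp]
    split_ifs
    · simp
    · have := pvSplitSp_ne_nil rest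
      cases h : pvSplitSp rest with
      | nil => exact absurd h this
      | cons a t => simp

lemma pvGo_spec (fuel : Nat) (l cur : List Char) (acc : List (List Char)) (h : l.length < fuel) :
    PySem.Chars.splitOn.go [' '] fuel l cur acc
      = acc.reverse ++ (pvSplitSp l).modifyHead (cur.reverse ++ ·) := by
  induction fuel generalizing l cur acc with
  | zero => omega
  | succ fuel ih =>
    cases l with
    | nil => simp [PySem.Chars.splitOn.go, pvSplitSp]
    | cons c rest =>
      by_cases hc : c = ' '
      · subst hc
        rw [show PySem.Chars.splitOn.go [' '] (fuel+1) (' ' :: rest) cur acc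
              = PySem.Chars.splitOn.go [' '] fuel rest [] (cur.reverse :: acc) by
            simp [PySem.Chars.splitOn.go, List.isPrefixOf]]
        rw [ih rest [] (cur.reverse :: acc) (by simpa using Nat.lt_of_succ_lt_succ h)]
        rcases hr : pvSplitSp rest with _ | ⟨a, t⟩ <;> simp [pvSplitSp, hr]
      · rw [show PySem.Chars.splitOn.go [' '] (fuel+1) (c :: rest) cur acc
              = PySem.Chars.splitOn.go [' '] fuel rest (c :: cur) acc by
            simp [PySem.Chars.splitOn.go, List.isPrefixOf, Ne.symm hc]]
        rw [ih rest (c :: cur) acc (by simpa using Nat.lt_of_succ_lt_succ h)]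
        simp only [pvSplitSp, if_neg hc]
        cases hr : pvSplitSp rest with
        | nil => exact absurd hr (pvSplitSp_ne_nil rest)
        | cons a t => simp

lemma pvSplitOn_eq (s : List Char) : PySem.Chars.splitOn s " ".toList = pvSplitSp s := by
  have h := pvGo_spec (s.length + 1) s [] [] (by omega)
  have hsp : (" ".toList : List Char) = [' '] := rfl
  rw [PySem.Chars.splitOn, hsp, h]
  cases hr : pvSplitSp s with
  | nil => exact absurd hr (pvSplitSp_ne_nil s)
  | cons a t => simp

lemma pvSplitSp_no_space (s : List Char) : ∀ w ∈ pvSplitSp s, ' ' ∉ w := by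
  induction s with
  | nil => intro w hw; simp [pvSplitSp] at hw; simp [hw]
  | cons c rest ih =>
    intro w hw
    simp only [pvSplitSp] at hw
    split_ifs at hw with hc
    · rcases List.mem_cons.mp hw with hw | hw
      · simp [hw]
      · exact ih w hw
    · cases hr : pvSplitSp rest with
      | nil => rw [hr] at hw; simp at hw
      | cons a t =>
        rw [hr] at hw
        simp only [List.modifyHead, List.mem_cons] at hw
        rcases hw with hw | hw
        · subst hw
          intro hmem
          rcases List.mem_cons.mp hmem with h1 | h1
          · exact hc h1.symm
          · exact ih a (by rw [hr]; exact List.mem_cons_self) h1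
        · exact ih w (by rw [hr]; exact List.mem_cons_of_mem a hw)

def pvGlue (ws : List (List Char)) : List Char := ws.flatMap (· ++ [' '])

lemma pvSplitSp_word (w rest : List Char) (hw : ' ' ∉ w) :
    pvSplitSp (w ++ ' ' :: rest) = w :: pvSplitSp rest := by
  induction w with
  | nil => simp [pvSplitSp]
  | cons c w' ih =>
    have hc : c ≠ ' ' := fun h => hw (by simp [h])
    have hw' : ' ' ∉ w' := fun h => hw (List.mem_cons_of_mem _ h)
    simp only [List.cons_append, pvSplitSp, if_neg hc, ih hw', List.modifyHead]

lemma pvSplitSp_glue (ws : List (List Char)) (h : ∀ w ∈ ws, ' ' ∉ w) :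
    pvSplitSp (pvGlue ws) = ws ++ [[]] := by
  induction ws with
  | nil => simp [pvGlue, pvSplitSp]
  | cons w ws ih =>
    have : pvGlue (w :: ws) = w ++ ' ' :: pvGlue ws := by simp [pvGlue]
    rw [this, pvSplitSp_word w _ (h w List.mem_cons_self),
        ih (fun v hv => h v (List.mem_cons_of_mem w hv))]
    simp

lemma pvJoin_cons (w : List Char) (l : List (List Char)) (h : l ≠ []) :
    PySem.Chars.join " ".toList (w :: l) = w ++ ' ' :: PySem.Chars.join " ".toList l := by
  cases l with
  | nil => exact absurd rfl h
  | cons a t =>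
    show List.intercalate [' '] (w :: a :: t) = w ++ ' ' :: List.intercalate [' '] (a :: t)
    simp [List.intercalate, List.intersperse]

lemma pvJoin_append_nil (ws : List (List Char)) :
    PySem.Chars.join " ".toList (ws ++ [[]]) = pvGlue ws := by
  induction ws with
  | nil => simp [PySem.Chars.join, pvGlue, List.intercalate]
  | cons w ws ih =>
    rw [List.cons_append, pvJoin_cons w _ (by simp), ih]
    simp [pvGlue]

lemma pvGlue_eq_join_append (ws : List (List Char)) (h : ws ≠ []) :
    pvGlue ws = PySem.Chars.join " ".toList ws ++ [' '] := by
  induction ws with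
  | nil => exact absurd rfl h
  | cons w ws ih =>
    cases ws with
    | nil => simp [pvGlue, PySem.Chars.join, List.intercalate]
    | cons a t =>
      rw [pvJoin_cons w _ (by simp)]
      have : pvGlue (w :: a :: t) = w ++ ' ' :: pvGlue (a :: t) := by simp [pvGlue]
      rw [this, ih (by simp)]
      simp

lemma pvRstrip_append_space (x : List Char) :
    PySem.Chars.rstrip (x ++ [' ']) = PySem.Chars.rstrip x := by
  simp [PySem.Chars.rstrip, show PySem.Chars.isspace ' ' = true from rfl]

lemma pvStrip_append_space (x : List Char) :
    PySem.Chars.strip (x ++ [' ']) = PySem.Chars.strip x := by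
  simp only [PySem.Chars.strip, PySem.Chars.lstrip, List.dropWhile_append]
  split_ifs with h
  · have : List.dropWhile PySem.Chars.isspace x = [] := by
      simpa [List.isEmpty_iff] using h
    simp [this, PySem.Chars.rstrip, List.dropWhile, show PySem.Chars.isspace ' ' = true from rfl]
  · exact pvRstrip_append_space _

lemma pvStrip_glue (ws : List (List Char)) :
    PySem.Chars.strip (pvGlue ws) = PySem.Chars.strip (PySem.Chars.join " ".toList ws) := by
  cases ws with
  | nil => rfl
  | cons w t => rw [pvGlue_eq_join_append _ (by simp), pvStrip_append_space]

lemma pvStepA_eq (p d : List Char) (g : Bool) (w : List Char) :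
    pvStepA (p, d, g) w =
      if pvMarker w then (p, d, true)
      else if g then (p, d ++ w ++ [' '], g) else (p ++ w ++ [' '], d, g) := rfl

lemma pvPhase2 (ws : List (List Char)) (p : List Char) : ∀ d,
    ws.foldl pvStepA (p, d, true) = (p, d ++ pvGlue (ws.filter (fun w => !pvMarker w)), true) := by
  induction ws with
  | nil => intro d; simp [pvGlue]
  | cons w ws ih =>
    intro d
    rw [List.foldl_cons, pvStepA_eq]
    by_cases hm : pvMarker w
    · rw [if_pos hm, ih d]
      simp [hm]
    · rw [if_neg (by simp [hm]), if_pos rfl, ih (d ++ w ++ [' '])]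
      simp [pvGlue, hm, List.append_assoc]

lemma pvPhase1_none (ws : List (List Char)) (h : ∀ w ∈ ws, pvMarker w = false) : ∀ p,
    ws.foldl pvStepA (p, [], false) = (p ++ pvGlue ws, [], false) := by
  induction ws with
  | nil => intro p; simp [pvGlue]
  | cons w ws ih =>
    intro p
    rw [List.foldl_cons, pvStepA_eq]
    simp only [h w List.mem_cons_self, Bool.false_eq_true, if_false,
      ih (fun v hv => h v (List.mem_cons_of_mem w hv))]
    simp [pvGlue]

lemma pvPhase1_some (ws : List (List Char)) : ∀ i, ws.findIdx? pvMarker = some i → ∀ p,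
    ws.foldl pvStepA (p, [], false)
      = (p ++ pvGlue (ws.take i), pvGlue ((ws.drop (i + 1)).filter (fun w => !pvMarker w)), true) := by
  induction ws with
  | nil => intro i hi; simp at hi
  | cons w ws ih =>
    intro i hi p
    rw [List.findIdx?_cons] at hi
    by_cases hm : pvMarker w
    · simp only [hm, if_true, Option.some.injEq] at hi
      subst hi
      rw [List.foldl_cons, pvStepA_eq]
      simp only [hm, if_true]
      rw [pvPhase2 ws p []]
      simp [pvGlue]
    · simp only [hm, Bool.false_eq_true, if_false, Option.map_eq_some_iff] at hi
      obtain ⟨j, hj, rfl⟩ := hi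
      rw [List.foldl_cons, pvStepA_eq]
      simp only [hm, Bool.false_eq_true, if_false]
      rw [ih j hj (p ++ w ++ [' '])]
      simp [pvGlue]

-- A's split/last-word-check/rejoin tail applied to a glued word list is a plain strip-join
lemma pvPlainTail (ws : List (List Char)) (h : ∀ w ∈ ws, ' ' ∉ w) :
    PySem.Chars.strip (PySem.Chars.join " ".toList
      (if PySem.Chars.isIn "plaintiff".toList
          (PySem.Chars.lower (PySem.List.pyGetD (PySem.Chars.splitOn (pvGlue ws) " ".toList) (-1) [])) then
        PySem.List.slice (PySem.Chars.splitOn (pvGlue ws) " ".toList) none (some (-1))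
      else PySem.Chars.splitOn (pvGlue ws) " ".toList))
    = PySem.Chars.strip (PySem.Chars.join " ".toList ws) := by
  rw [pvSplitOn_eq, pvSplitSp_glue ws h, PySem.List.pyGetD_neg_one_append_singleton]
  rw [if_neg (by decide)]
  rw [pvJoin_append_nil, pvStrip_glue]

-- ===== VERDICT =====
theorem clean_lines_spec : Claim_equal_clean_lines := by
  intro lines _
  unfold Spec_clean_lines
  simp only [clean_lines, clean_lines_alt]
  set words := PySem.Chars.splitOn (PySem.Chars.join " ".toList (lines.map String.toList)) " ".toList with hwords
  have hns : ∀ w ∈ words, ' ' ∉ w := by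
    rw [hwords, pvSplitOn_eq]; exact pvSplitSp_no_space _
  cases hidx : words.findIdx? pvMarker with
  | none =>
    have hall : ∀ w ∈ words, pvMarker w = false := List.findIdx?_eq_none_iff.mp hidx
    rw [pvPhase1_none words hall []]
    simp only [List.nil_append]
    rw [pvPlainTail words hns]
    rfl
  | some i =>
    rw [pvPhase1_some words i hidx []]
    simp only [List.nil_append]
    rw [pvPlainTail (words.take i) (fun w hw => hns w (List.mem_of_mem_take hw)), pvStrip_glue]
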